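-- pv_equiv track=rewrite | github.com/sertannavdann/gRPC_LLM_Container | shared/modules/audit.py | classify_failure_type
-- ===== SOURCE A (Python) =====
-- from enum import Enum
-- from typing import Dict, List, Optional, Any
--
-- class FailureType(str, Enum):
--     """Classification of failure types for repair decisions."""
--     # Retryable failures (can attempt repair)
--     TEST_FAILURE = "test_failure"
--     SCHEMA_MISMATCH = "schema_mismatch"
--     MISSING_METHOD = "missing_method"
--     IMPORT_VIOLATION = "import_violation"
--     SYNTAX_ERROR = "syntax_error"
--
--     # Terminal failures (stop immediately, no repair)
--     POLICY_VIOLATION = "policy_violation"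
--     SECURITY_BLOCK = "security_block"
--     BUDGET_EXCEEDED = "budget_exceeded"
--     GATEWAY_FAILURE = "gateway_failure"
--
-- def classify_failure_type(validation_report: Dict[str, Any]) -> FailureType:
--     """
--     Classify failure as retryable or terminal.
--
--     Terminal failures stop repair loop immediately:
--     - policy_violation: Security/compliance violations
--     - security_block: Forbidden imports, dangerous operations
--     - budget_exceeded: Token/cost limits reached
--     - gateway_failure: LLM provider errors
--
--     Retryable failures allow repair attempts:
--     - test_failure: Unit/integration tests failed
--     - schema_mismatch: Output doesn't match contract
--     - missing_method: Required methods not implemented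
--     - import_violation: Forbidden but fixable imports
--     - syntax_error: Python syntax errors
--     """
--     # Check for terminal failures first
--     fix_hints = validation_report.get("fix_hints", [])
--
--     for hint in fix_hints:
--         category = hint.get("category", "")
--
--         # Terminal: Policy/security violations
--         if category in ["policy_violation", "security_block"]:
--             return FailureType.POLICY_VIOLATION
--
--         # Terminal: Budget issues (if we add budget tracking later)
--         if category == "budget_exceeded":
--             return FailureType.BUDGET_EXCEEDED
--
--     # Check for retryable failures
--     for hint in fix_hints:
--         category = hint.get("category", "")
--
--         if category == "test_failure":
--             return FailureType.TEST_FAILURE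
--         elif category == "schema_error":
--             return FailureType.SCHEMA_MISMATCH
--         elif category == "missing_method":
--             return FailureType.MISSING_METHOD
--         elif category == "import_violation":
--             return FailureType.IMPORT_VIOLATION
--         elif category == "syntax_error":
--             return FailureType.SYNTAX_ERROR
--
--     # Default to test failure for unknown cases
--     return FailureType.TEST_FAILURE
-- ===== SOURCE B (Python) =====
-- from enum import Enum
-- from typing import Dict, List, Optional, Any
--
-- class FailureType(str, Enum):
--     """Classification of failure types for repair decisions."""
--     TEST_FAILURE = "test_failure"
--     SCHEMA_MISMATCH = "schema_mismatch"
--     MISSING_METHOD = "missing_method"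
--     IMPORT_VIOLATION = "import_violation"
--     SYNTAX_ERROR = "syntax_error"
--     POLICY_VIOLATION = "policy_violation"
--     SECURITY_BLOCK = "security_block"
--     BUDGET_EXCEEDED = "budget_exceeded"
--     GATEWAY_FAILURE = "gateway_failure"
--
-- _RETRYABLE = {
--     "test_failure": FailureType.TEST_FAILURE,
--     "schema_error": FailureType.SCHEMA_MISMATCH,
--     "missing_method": FailureType.MISSING_METHOD,
--     "import_violation": FailureType.IMPORT_VIOLATION,
--     "syntax_error": FailureType.SYNTAX_ERROR,
-- }
--
-- def classify_failure_type(validation_report: Dict[str, Any]) -> FailureType: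
--     """Single pass: terminal hints return immediately; first retryable hint is remembered."""
--     first_retryable = None
--     for hint in validation_report.get("fix_hints", []):
--         category = hint.get("category", "")
--         if category in ("policy_violation", "security_block"):
--             return FailureType.POLICY_VIOLATION
--         if category == "budget_exceeded":
--             return FailureType.BUDGET_EXCEEDED
--         if first_retryable is None:
--             first_retryable = _RETRYABLE.get(category)
--     return first_retryable if first_retryable is not None else FailureType.TEST_FAILURE
-- ===== Notes on version B (the rewrite author's own statement) =====
-- stated objective: simpler
-- what changed: Replaces A's two sequential passes over fix_hints (terminal scan, then a retryable elif chain) with one pass that returns immediately on a terminal category and remembers the first retryable category via a table lookup.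
import Mathlib
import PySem

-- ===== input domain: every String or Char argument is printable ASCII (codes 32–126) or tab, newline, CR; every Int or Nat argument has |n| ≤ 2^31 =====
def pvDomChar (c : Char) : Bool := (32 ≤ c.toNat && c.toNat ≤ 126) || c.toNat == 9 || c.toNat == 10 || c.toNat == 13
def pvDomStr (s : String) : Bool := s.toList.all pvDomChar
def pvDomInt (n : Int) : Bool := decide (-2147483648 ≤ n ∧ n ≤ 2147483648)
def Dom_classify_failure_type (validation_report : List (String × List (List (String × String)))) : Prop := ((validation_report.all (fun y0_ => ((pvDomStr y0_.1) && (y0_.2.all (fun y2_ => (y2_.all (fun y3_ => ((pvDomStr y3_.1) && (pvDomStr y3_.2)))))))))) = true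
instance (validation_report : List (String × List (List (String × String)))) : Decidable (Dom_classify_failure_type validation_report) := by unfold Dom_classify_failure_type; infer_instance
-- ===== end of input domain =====

-- B replaces A's two sequential passes over fix_hints with a single pass that returns
-- immediately on terminal categories and remembers the first retryable one (objective: simpler).
-- Enum members of the str-enum FailureType are ported as their string values.

-- ===== PORT A =====
-- first loop: scan for terminal categories
def pvA_terminal : List (List (String × String)) → Option String
  | [] => none
  | hint :: rest =>
    let category := PySem.Dict.getD (PySem.Dict.mk hint) "category" ""
    if category = "policy_violation" ∨ category = "security_block" then some "policy_violation"
    else if category = "budget_exceeded" then some "budget_exceeded"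
    else pvA_terminal rest

-- second loop: elif chain over retryable categories
def pvA_retry : List (List (String × String)) → Option String
  | [] => none
  | hint :: rest =>
    let category := PySem.Dict.getD (PySem.Dict.mk hint) "category" ""
    if category = "test_failure" then some "test_failure"
    else if category = "schema_error" then some "schema_mismatch"
    else if category = "missing_method" then some "missing_method"
    else if category = "import_violation" then some "import_violation"
    else if category = "syntax_error" then some "syntax_error"
    else pvA_retry rest

def classify_failure_type (validation_report : List (String × List (List (String × String)))) : String :=
  let fix_hints := PySem.Dict.getD (PySem.Dict.mk validation_report) "fix_hints" []
  match pvA_terminal fix_hints with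
  | some r => r
  | none =>
    match pvA_retry fix_hints with
    | some r => r
    | none => "test_failure"

-- ===== PORT B =====
-- the module-level _RETRYABLE dict of Source B
def pvB_RETRYABLE : PySem.Dict String String :=
  PySem.Dict.mk [("test_failure", "test_failure"), ("schema_error", "schema_mismatch"),
                 ("missing_method", "missing_method"), ("import_violation", "import_violation"),
                 ("syntax_error", "syntax_error")]

-- single pass carrying first_retryable
def pvB_loop : List (List (String × String)) → Option String → String
  | [], first_retryable => first_retryable.getD "test_failure"
  | hint :: rest, first_retryable =>
    let category := PySem.Dict.getD (PySem.Dict.mk hint) "category" ""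
    if category = "policy_violation" ∨ category = "security_block" then "policy_violation"
    else if category = "budget_exceeded" then "budget_exceeded"
    else pvB_loop rest (match first_retryable with
                        | some x => some x
                        | none => PySem.Dict.get? pvB_RETRYABLE category)

def classify_failure_type_alt (validation_report : List (String × List (List (String × String)))) : String :=
  pvB_loop (PySem.Dict.getD (PySem.Dict.mk validation_report) "fix_hints" []) none

-- ===== PRECONDITION & SPEC =====
def Spec_classify_failure_type (validation_report : List (String × List (List (String × String)))) (out : String) : Prop := out = classify_failure_type_alt validation_report
instance (validation_report : List (String × List (List (String × String)))) (out : String) : Decidable (Spec_classify_failure_type validation_report out) := by unfold Spec_classify_failure_type; infer_instance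

-- ===== CLAIM (what is proved, stated in full; the proofs are below) =====
def Claim_equal_classify_failure_type : Prop := ∀ (validation_report : List (String × List (List (String × String)))), Dom_classify_failure_type validation_report → Spec_classify_failure_type validation_report (classify_failure_type validation_report)

-- ===== LEMMAS AND PROOFS =====

-- the single-pass loop with accumulator equals A's two passes
theorem pvB_loop_eq (hints : List (List (String × String))) (fr : Option String) :
    pvB_loop hints fr =
      match pvA_terminal hints with
      | some r => r
      | none =>
        match fr with
        | some x => x
        | none => (pvA_retry hints).getD "test_failure" := by
  induction hints generalizing fr with
  | nil => cases fr <;> rfl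
  | cons hint rest ih =>
    simp only [pvB_loop, pvA_terminal, pvA_retry]
    by_cases h1 : PySem.Dict.getD (PySem.Dict.mk hint) "category" "" = "policy_violation" ∨
        PySem.Dict.getD (PySem.Dict.mk hint) "category" "" = "security_block"
    · simp [h1]
    · simp only [h1, if_false]
      by_cases h2 : PySem.Dict.getD (PySem.Dict.mk hint) "category" "" = "budget_exceeded"
      · simp [h2]
      · simp only [h2, if_false]
        rw [ih]
        cases fr with
        | some x => rfl
        | none =>
          set c := PySem.Dict.getD (PySem.Dict.mk hint) "category" "" with hc
          by_cases h3 : c = "test_failure"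
          · simp [h3, pvB_RETRYABLE, PySem.Dict.get?]
          · by_cases h4 : c = "schema_error"
            · simp [h4, pvB_RETRYABLE, PySem.Dict.get?]
            · by_cases h5 : c = "missing_method"
              · simp [h5, pvB_RETRYABLE, PySem.Dict.get?]
              · by_cases h6 : c = "import_violation"
                · simp [h6, pvB_RETRYABLE, PySem.Dict.get?]
                · by_cases h7 : c = "syntax_error"
                  · simp [h7, pvB_RETRYABLE, PySem.Dict.get?]
                  · have hnone : PySem.Dict.get? pvB_RETRYABLE c = none := by
                      simp [pvB_RETRYABLE, PySem.Dict.get?,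
                        Ne.symm h3, Ne.symm h4, Ne.symm h5, Ne.symm h6, Ne.symm h7]
                    simp [hnone, h3, h4, h5, h6, h7]

-- ===== VERDICT (by name: the statement is the Claim_ definition above) =====
theorem classify_failure_type_spec : Claim_equal_classify_failure_type := by
  intro vr _
  unfold Spec_classify_failure_type classify_failure_type classify_failure_type_alt
  rw [pvB_loop_eq]
  cases h : pvA_terminal (PySem.Dict.getD (PySem.Dict.mk vr) "fix_hints" []) with
  | some r => simp [h]
  | none =>
    cases h2 : pvA_retry (PySem.Dict.getD (PySem.Dict.mk vr) "fix_hints" []) with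
    | some r => simp [h, h2]
    | none => simp [h, h2]
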